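-- pv_equiv track=rewrite | github.com/MARUCIE/cognebula-enterprise | src/cognebula.py | line_of_fast
-- ===== SOURCE A (Python) =====
-- def line_of_fast(line_index: list[int], index: int) -> int:
--     """Binary search for line number using pre-computed index."""
--     lo, hi = 0, len(line_index) - 1
--     while lo <= hi:
--         mid = (lo + hi) // 2
--         if line_index[mid] <= index:
--             lo = mid + 1
--         else:
--             hi = mid - 1
--     return lo
-- ===== SOURCE B (Python) =====
-- def line_of_fast(line_index: list[int], index: int) -> int:
--     """Binary search for line number, recursing on the count of remaining candidates."""
--     def go(lo: int, n: int) -> int:  # n candidates starting at position lo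
--         if n == 0:
--             return lo
--         step = (n - 1) // 2
--         if line_index[lo + step] <= index:
--             return go(lo + step + 1, n // 2)
--         return go(lo, step)
--     return go(0, len(line_index))
-- ===== Notes on version B (the rewrite author's own statement) =====
-- stated objective: alternative
-- what changed: Replaced the iterative lo/hi closed-interval binary search by a recursion on the count of remaining candidates, state (lo, n) with probe at lo+(n-1)//2 and halving n; same probe sequence, so identical results on every input, sorted or not.
import Mathlib
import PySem

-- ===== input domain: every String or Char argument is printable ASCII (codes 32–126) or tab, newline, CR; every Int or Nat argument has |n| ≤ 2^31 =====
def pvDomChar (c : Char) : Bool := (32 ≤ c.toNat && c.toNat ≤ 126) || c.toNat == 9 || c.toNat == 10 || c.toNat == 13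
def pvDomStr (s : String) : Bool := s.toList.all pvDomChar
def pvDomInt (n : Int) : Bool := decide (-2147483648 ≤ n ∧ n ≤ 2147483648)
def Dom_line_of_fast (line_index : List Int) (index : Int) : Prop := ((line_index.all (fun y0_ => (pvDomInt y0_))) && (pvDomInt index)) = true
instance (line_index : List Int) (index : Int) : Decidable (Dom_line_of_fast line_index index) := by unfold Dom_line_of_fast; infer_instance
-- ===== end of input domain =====

-- B replaces A's iterative lo/hi closed-interval binary search by a recursion on the
-- COUNT of remaining candidates: state (lo, n), probe at lo+(n-1)//2, n halves each step;
-- the probe sequence is the same, so the result is identical on every input, sorted or not.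

-- ===== PORT A =====
-- the while loop of A, state (lo, hi), closed interval; fuel length+1 is ample
-- since the interval shrinks every iteration
def lofLoopA (line_index : List Int) (index : Int) : Nat → Int → Int → Int
  | 0, lo, _ => lo
  | fuel + 1, lo, hi =>
    if lo ≤ hi then
      let mid := PySem.Int.floordiv (lo + hi) 2
      if (PySem.List.pyGet? line_index mid).getD 0 ≤ index then
        lofLoopA line_index index fuel (mid + 1) hi
      else
        lofLoopA line_index index fuel lo (mid - 1)
    else lo

def line_of_fast (line_index : List Int) (index : Int) : Int :=
  lofLoopA line_index index (line_index.length + 1) 0 ((line_index.length : Int) - 1)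

-- ===== PORT B =====
-- Source B's inner go(lo, n): n remaining candidates starting at position lo;
-- n is a count, so it is a Nat here and the recursion is well-founded on n (no fuel)
def lofGoB (line_index : List Int) (index : Int) (lo : Int) (n : Nat) : Int :=
  if n = 0 then lo
  else
    let step := (n - 1) / 2
    if (PySem.List.pyGet? line_index (lo + (step : Int))).getD 0 ≤ index then
      lofGoB line_index index (lo + (step : Int) + 1) (n / 2)
    else
      lofGoB line_index index lo step
  termination_by n
  decreasing_by all_goals omega

def line_of_fast_alt (line_index : List Int) (index : Int) : Int :=
  lofGoB line_index index 0 line_index.length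

-- ===== PRECONDITION & SPEC =====
def Spec_line_of_fast (line_index : List Int) (index : Int) (out : Int) : Prop := out = line_of_fast_alt line_index index
instance (line_index : List Int) (index : Int) (out : Int) : Decidable (Spec_line_of_fast line_index index out) := by unfold Spec_line_of_fast; infer_instance

-- ===== CLAIM (what is proved, stated in full; the proofs are below) =====
def Claim_equal_line_of_fast : Prop := ∀ (line_index : List Int) (index : Int), Dom_line_of_fast line_index index → Spec_line_of_fast line_index index (line_of_fast line_index index)

-- ===== LEMMAS AND PROOFS =====
-- B's count-based recursion on (lo, n) equals A's loop on the closed interval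
-- [lo, lo+n-1], as long as the fuel is at least n (the count shrinks with each probe).
theorem lofGoB_eq_lofLoopA (line_index : List Int) (index : Int) :
    ∀ fuel n : Nat, n ≤ fuel → ∀ lo : Int,
      lofGoB line_index index lo n = lofLoopA line_index index fuel lo (lo + (n : Int) - 1) := by
  intro fuel
  induction fuel with
  | zero =>
    intro n hn lo
    interval_cases n
    rw [lofGoB]
    rfl
  | succ f ih =>
    intro n hn lo
    rw [lofGoB, lofLoopA]
    by_cases h0 : n = 0
    · simp [h0]
    · have hpos : 0 < n := Nat.pos_of_ne_zero h0
      have hguard : lo ≤ lo + (n : Int) - 1 := by omega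
      have hmid : PySem.Int.floordiv (lo + (lo + (n : Int) - 1)) 2
          = lo + (((n - 1) / 2 : Nat) : Int) := by
        rw [PySem.Int.floordiv_eq_ediv_of_pos (by norm_num)]
        omega
      simp only [h0, hguard, if_pos, if_neg, not_false_eq_true, hmid]
      split
      · rw [ih (n / 2) (by omega)]
        congr 1
        omega
      · rw [ih ((n - 1) / 2) (by omega)]

-- ===== VERDICT (by name: the statement is the Claim_ definition above) =====
theorem line_of_fast_spec : Claim_equal_line_of_fast := by
  intro line_index index _
  unfold Spec_line_of_fast line_of_fast line_of_fast_alt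
  rw [lofGoB_eq_lofLoopA line_index index (line_index.length + 1) line_index.length (by omega)]
  congr 1
  omega
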